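-- pv_equiv track=rewrite | github.com/dima17502/DFC | main.py | anf_to_vector
-- ===== SOURCE A (Python) =====
-- def anf_to_vector(anf):
--     #  Сложность: O(2^(2n))
--     mat = []
--     mat.append(anf)
--     for i in range(1, len(anf)):        # 2^n
--         mat.append([])
--         for j in range(len(anf) - i):   # 2^(n-1)
--             mat[i].append(int(mat[i-1][j])^int(mat[i-1][j+1]))
--     vector = ''
--     for v in mat:   # 2^n
--         vector += str(v[0])
--     return vector
-- ===== SOURCE B (Python) =====
-- def anf_to_vector(anf):
--     # Closed form per position: entry i is the XOR of anf[j] over all j whose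
--     # bits are a subset of i's bits (Lucas: C(i,j) is odd iff j & i == j),
--     # instead of iterating the adjacent-XOR difference triangle.
--     out = []
--     for i in range(len(anf)):
--         x = 0
--         for j in range(i + 1):
--             if j & i == j:
--                 x ^= anf[j]
--         out.append(str(x))
--     return ''.join(out)
-- ===== Notes on version B (the rewrite author's own statement) =====
-- stated objective: faster
-- what changed: A builds the full adjacent-XOR difference triangle row by row and reads off the first element of each row; B computes each output position directly by the Lucas closed form (entry i = XOR of the inputs at positions j with j & i == j) in a plain integer accumulator, allocating no triangle rows.
import Mathlib
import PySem

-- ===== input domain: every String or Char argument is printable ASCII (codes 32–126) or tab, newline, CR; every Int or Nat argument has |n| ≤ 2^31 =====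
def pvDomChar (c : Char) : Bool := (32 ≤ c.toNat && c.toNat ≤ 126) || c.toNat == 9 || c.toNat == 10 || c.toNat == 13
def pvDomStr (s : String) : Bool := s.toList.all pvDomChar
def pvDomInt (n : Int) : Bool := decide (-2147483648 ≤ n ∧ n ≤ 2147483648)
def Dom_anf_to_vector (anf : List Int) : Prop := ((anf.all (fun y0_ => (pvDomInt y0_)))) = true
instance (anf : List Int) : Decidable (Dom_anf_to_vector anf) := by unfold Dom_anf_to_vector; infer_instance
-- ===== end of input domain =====

-- B replaces A's iterated adjacent-XOR difference triangle by a per-position closed form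
-- (entry i = XOR of the inputs at positions that are bit-subsets of i, by Lucas' theorem);
-- objective: faster (measured constant-factor: no triangle rows are allocated).

-- ===== PORT A =====
-- A's 'mat.append([])' followed by in-place 'mat[i].append(...)' is modeled by appending the
-- completed row (the inner loop only reads row i-1, so the values are identical); all list
-- indices are in range on every input admitted by Pre_, so List.getD is value-exact there;
-- Python's int(...) on a value that is already an int is the identity and is dropped.
def anf_to_vector (anf : List Int) : String :=
  let mat : List (List Int) :=
    (List.range' 1 (anf.length - 1)).foldl
      (fun mat i =>
        mat ++ [(List.range (anf.length - i)).foldl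
          (fun row j =>
            row ++ [PySem.Int.bxor ((mat.getD (i - 1) []).getD j 0)
                                   ((mat.getD (i - 1) []).getD (j + 1) 0)]) []])
      [anf]
  mat.foldl (fun vector v => vector ++ PySem.Int.toStr (v.getD 0 0)) ""

-- ===== PORT B =====
def anf_to_vector_alt (anf : List Int) : String :=
  let out : List String :=
    (List.range anf.length).foldl
      (fun out i =>
        out ++ [PySem.Int.toStr
          ((List.range (i + 1)).foldl
            (fun x j => if j &&& i = j then PySem.Int.bxor x (anf.getD j 0) else x) 0)]) []
  PySem.Str.join "" out

-- ===== PRECONDITION & SPEC =====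
-- A indexes the first element of the first row, so it raises IndexError exactly on the empty list.
def Pre_anf_to_vector (anf : List Int) : Prop := anf ≠ []
instance (anf : List Int) : Decidable (Pre_anf_to_vector anf) := by unfold Pre_anf_to_vector; infer_instance
def pvWitness_anf_to_vector : List Int := [1, 0, 1]

def Spec_anf_to_vector (anf : List Int) (out : String) : Prop := out = anf_to_vector_alt anf
instance (anf : List Int) (out : String) : Decidable (Spec_anf_to_vector anf out) := by unfold Spec_anf_to_vector; infer_instance

-- ===== CLAIM (what is proved, stated in full; the proofs are below) =====
def Claim_equal_anf_to_vector : Prop := ∀ (anf : List Int), Dom_anf_to_vector anf → Pre_anf_to_vector anf → Spec_anf_to_vector anf (anf_to_vector anf)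

-- ===== LEMMAS AND PROOFS =====

-- PySem.Int.bxor on the Int constructors, and associativity.
theorem bxor_cast_negSucc (m n : Nat) :
    PySem.Int.bxor (m : Int) (Int.negSucc n) = Int.negSucc (m ^^^ n) := by
  simp [PySem.Int.bxor, Int.negSucc_eq]
  omega

theorem bxor_negSucc_cast (m n : Nat) :
    PySem.Int.bxor (Int.negSucc m) (n : Int) = Int.negSucc (m ^^^ n) := by
  simp [PySem.Int.bxor, Int.negSucc_eq]
  omega

theorem bxor_negSucc_negSucc (m n : Nat) :
    PySem.Int.bxor (Int.negSucc m) (Int.negSucc n) = (↑(m ^^^ n) : Int) := by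
  simp [PySem.Int.bxor, Int.negSucc_eq]
  omega

theorem bxor_assoc (a b c : Int) :
    PySem.Int.bxor (PySem.Int.bxor a b) c = PySem.Int.bxor a (PySem.Int.bxor b c) := by
  rcases a with m | m <;> rcases b with n | n <;> rcases c with k | k <;>
    simp [bxor_cast_negSucc, bxor_negSucc_cast, bxor_negSucc_negSucc, Nat.xor_assoc]

theorem zero_bxor (a : Int) : PySem.Int.bxor 0 a = a := by
  rw [PySem.Int.bxor_comm, PySem.Int.bxor_zero]

theorem bxor_bxor_bxor_comm (a b c d : Int) :
    PySem.Int.bxor (PySem.Int.bxor a b) (PySem.Int.bxor c d)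
      = PySem.Int.bxor (PySem.Int.bxor a c) (PySem.Int.bxor b d) := by
  rw [bxor_assoc, bxor_assoc, ← bxor_assoc b c d, ← bxor_assoc c b d,
    PySem.Int.bxor_comm b c]

-- XOR-sum of f over a list of indices.
def xsum (f : Nat → Int) (l : List Nat) : Int :=
  l.foldr (fun k acc => PySem.Int.bxor (f k) acc) 0

theorem xsum_nil (f : Nat → Int) : xsum f [] = 0 := rfl

theorem xsum_cons (f : Nat → Int) (k : Nat) (l : List Nat) :
    xsum f (k :: l) = PySem.Int.bxor (f k) (xsum f l) := rfl

theorem xsum_append (f : Nat → Int) (l l' : List Nat) :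
    xsum f (l ++ l') = PySem.Int.bxor (xsum f l) (xsum f l') := by
  induction l with
  | nil => simp [xsum_nil, zero_bxor]
  | cons k l ih => simp only [List.cons_append, xsum_cons, ih, bxor_assoc]

theorem xsum_split (f g : Nat → Int) (l : List Nat) :
    xsum (fun k => PySem.Int.bxor (f k) (g k)) l
      = PySem.Int.bxor (xsum f l) (xsum g l) := by
  induction l with
  | nil => simp [xsum_nil]
  | cons k l ih => simp only [xsum_cons, ih, bxor_bxor_bxor_comm]

theorem xsum_congr {f g : Nat → Int} {l : List Nat} (h : ∀ k ∈ l, f k = g k) :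
    xsum f l = xsum g l := by
  induction l with
  | nil => rfl
  | cons k l ih =>
      simp only [xsum_cons, h k (List.mem_cons_self ..),
        ih (fun x hx => h x (List.mem_cons_of_mem _ hx))]

-- a foldl with a guarded '^=' is a bxor of the start value with an xsum of guarded terms
theorem foldl_if_eq_xsum (p : Nat → Prop) [DecidablePred p] (g : Nat → Int)
    (l : List Nat) (c : Int) :
    l.foldl (fun x j => if p j then PySem.Int.bxor x (g j) else x) c
      = PySem.Int.bxor c (xsum (fun k => if p k then g k else 0) l) := by
  induction l generalizing c with
  | nil => simp [xsum_nil]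
  | cons k l ih =>
      simp only [List.foldl_cons, ih, xsum_cons]
      by_cases h : p k
      · simp [h, bxor_assoc]
      · simp [h, zero_bxor]

-- ---- bit combinatorics: the mod-2 Pascal rule for the subset relation j & i == j ----
theorem landrec (a b x y : Nat) (hx : x < 2) (hy : y < 2) :
    (2 * a + x) &&& (2 * b + y) = 2 * (a &&& b) + (x &&& y) := by
  apply Nat.eq_of_testBit_eq
  intro t
  cases t with
  | zero =>
      simp only [Nat.testBit_zero]
      interval_cases x <;> interval_cases y <;> simp
  | succ t =>
      rw [Nat.testBit_succ, Nat.testBit_succ, Nat.and_div_two]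
      have h1 : (2 * a + x) / 2 = a := by omega
      have h2 : (2 * b + y) / 2 = b := by omega
      have h3 : (2 * (a &&& b) + (x &&& y)) / 2 = a &&& b := by
        have : x &&& y ≤ x := Nat.and_le_left
        omega
      rw [h1, h2, h3]

theorem subl (a b x y : Nat) (hx : x < 2) (hy : y < 2) :
    ((2 * a + x) &&& (2 * b + y) = 2 * a + x) ↔ (a &&& b = a ∧ x ≤ y) := by
  rw [landrec a b x y hx hy]
  have h1 : a &&& b ≤ a := Nat.and_le_left
  have h2 : x &&& y ≤ x := Nat.and_le_left
  constructor
  · intro h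
    have ha : a &&& b = a ∧ x &&& y = x := by omega
    refine ⟨ha.1, ?_⟩
    have := ha.2
    interval_cases x <;> interval_cases y <;> simp_all
  · rintro ⟨ha, hxy⟩
    rw [ha]
    have : x &&& y = x := by interval_cases x <;> interval_cases y <;> simp_all
    omega

theorem sub00 (a b : Nat) : ((2*a) &&& (2*b) = 2*a) ↔ a &&& b = a := by
  have := subl a b 0 0 (by omega) (by omega); simpa using this
theorem sub01 (a b : Nat) : ((2*a) &&& (2*b+1) = 2*a) ↔ a &&& b = a := by
  have := subl a b 0 1 (by omega) (by omega); simpa using this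
theorem sub10 (a b : Nat) : ((2*a+1) &&& (2*b) = 2*a+1) ↔ False := by
  have := subl a b 1 0 (by omega) (by omega); simpa using this
theorem sub11 (a b : Nat) : ((2*a+1) &&& (2*b+1) = 2*a+1) ↔ a &&& b = a := by
  have := subl a b 1 1 (by omega) (by omega); simpa using this

-- Lucas' rule mod 2: membership of k in 'row i+1' of the XOR Pascal triangle
theorem bitPascal : ∀ i k : Nat, (k &&& (i + 1) = k) ↔
    ((k &&& i = k) ↔ ¬(1 ≤ k ∧ (k - 1) &&& i = k - 1)) := by
  intro i
  induction i using Nat.strong_induction_on with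
  | _ i IH =>
    intro k
    obtain ⟨b, y, hy, hi⟩ : ∃ b y, y < 2 ∧ i = 2*b + y := ⟨i/2, i%2, by omega, by omega⟩
    obtain ⟨a, x, hx, hk⟩ : ∃ a x, x < 2 ∧ k = 2*a + x := ⟨k/2, k%2, by omega, by omega⟩
    subst hi hk
    interval_cases y <;> interval_cases x <;> try simp only [Nat.add_zero]
    · -- i = 2b, k = 2a
      rw [sub01, sub00]
      rcases Nat.eq_zero_or_pos a with ha | ha
      · subst ha; simp
      · rw [show 2*a - 1 = 2*(a-1)+1 from by omega, sub10]
        simp [show 1 ≤ 2*a from by omega]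
    · -- i = 2b, k = 2a+1
      rw [sub11, sub10, show 2*a+1-1 = 2*a from by omega, sub00]
      simp only [show (1:Nat) ≤ 2*a+1 from by omega, true_and]
      by_cases h : a &&& b = a <;> simp [h]
    · -- i = 2b+1, k = 2a
      rw [show 2*b+1+1 = 2*(b+1) from by omega, sub00, sub01]
      have key := IH b (by omega) a
      rcases Nat.eq_zero_or_pos a with ha | ha
      · subst ha; simp
      · rw [show 2*a - 1 = 2*(a-1)+1 from by omega, sub11]
        rw [key]
        simp [show 1 ≤ 2*a from by omega, show 1 ≤ a from ha]
    · -- i = 2b+1, k = 2a+1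
      rw [show 2*b+1+1 = 2*(b+1) from by omega, sub10, sub11,
        show 2*a+1-1 = 2*a from by omega, sub01]
      simp only [show (1:Nat) ≤ 2*a+1 from by omega, true_and]
      by_cases h : a &&& b = a <;> simp [h]

theorem le_of_subset {k i : Nat} (h : k &&& i = k) : k ≤ i := h ▸ Nat.and_le_right

-- ---- the values the two programs compute ----

-- row i of A's difference triangle
def rowA (anf : List Int) : Nat → List Int
  | 0 => anf
  | i + 1 => (List.range (anf.length - (i + 1))).map
      (fun j => PySem.Int.bxor ((rowA anf i).getD j 0) ((rowA anf i).getD (j + 1) 0))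

-- B's closed form, with a window offset j
def Xv (anf : List Int) (i j : Nat) : Int :=
  xsum (fun k => if k &&& i = k then anf.getD (j + k) 0 else 0) (List.range (i + 1))

theorem pascalX (anf : List Int) (i j : Nat) :
    Xv anf (i + 1) j = PySem.Int.bxor (Xv anf i j) (Xv anf i (j + 1)) := by
  have hpt : ∀ k, (if k &&& (i+1) = k then anf.getD (j + k) 0 else 0)
      = PySem.Int.bxor (if k &&& i = k then anf.getD (j + k) 0 else 0)
          (if 1 ≤ k ∧ (k - 1) &&& i = k - 1 then anf.getD (j + k) 0 else 0) := by
    intro k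
    have hp := bitPascal i k
    by_cases c1 : k &&& i = k <;> by_cases c2 : 1 ≤ k ∧ (k - 1) &&& i = k - 1
    · rw [if_neg (by tauto), if_pos c1, if_pos c2, PySem.Int.bxor_self]
    · rw [if_pos (by tauto), if_pos c1, if_neg c2, PySem.Int.bxor_zero]
    · rw [if_pos (by tauto), if_neg c1, if_pos c2, zero_bxor]
    · rw [if_neg (by tauto), if_neg c1, if_neg c2, PySem.Int.bxor_zero]
  unfold Xv
  rw [xsum_congr (fun k _ => hpt k), xsum_split]
  congr 1
  · -- first summand: drop the vanishing top index i+1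
    rw [List.range_succ, xsum_append, xsum_cons, xsum_nil]
    rw [if_neg (fun h : (i+1) &&& i = i+1 => by have := le_of_subset h; omega)]
    rw [zero_bxor, PySem.Int.bxor_zero]
  · -- second summand: drop k = 0 and shift the index down by one
    rw [List.range_succ_eq_map, xsum_cons, if_neg (by omega), zero_bxor]
    unfold xsum
    rw [List.foldr_map]
    apply xsum_congr
    intro k _
    simp only [Nat.succ_sub_one]
    rw [if_congr (Iff.intro (fun h => h.2) (fun h => ⟨Nat.succ_le_succ (Nat.zero_le k), h⟩)) rfl rfl]
    rw [show j + (k + 1) = j + 1 + k from by omega]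

theorem main_lemma (anf : List Int) : ∀ i j, i + j < anf.length →
    (rowA anf i).getD j 0 = Xv anf i j := by
  intro i
  induction i with
  | zero =>
      intro j h
      show anf.getD j 0 = _
      unfold Xv
      rw [List.range_one, xsum_cons, xsum_nil, PySem.Int.bxor_zero]
      simp
  | succ i ih =>
      intro j h
      show ((List.range (anf.length - (i + 1))).map
        (fun j => PySem.Int.bxor ((rowA anf i).getD j 0) ((rowA anf i).getD (j + 1) 0))).getD j 0 = _
      rw [PySem.List.getD_map_range _ _ _ _ (by omega)]
      rw [ih j (by omega), ih (j + 1) (by omega), ← pascalX]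

theorem matlem (anf : List Int) : ∀ m,
    (List.range' 1 m).foldl
      (fun mat i =>
        mat ++ [(List.range (anf.length - i)).foldl
          (fun row j =>
            row ++ [PySem.Int.bxor ((mat.getD (i - 1) []).getD j 0)
                                   ((mat.getD (i - 1) []).getD (j + 1) 0)]) []])
      [anf]
    = (List.range (m + 1)).map (rowA anf) := by
  intro m
  induction m with
  | zero => simp [rowA]
  | succ m ih =>
      rw [List.range'_1_concat, List.foldl_append, ih, List.foldl_cons, List.foldl_nil]
      rw [List.range_succ (n := m + 1), List.map_append]
      congr 1
      rw [PySem.List.foldl_append_singleton_eq_map, List.nil_append]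
      rw [show 1 + m - 1 = m from by omega,
        PySem.List.getD_map_range _ _ _ _ (by omega),
        show anf.length - (1 + m) = anf.length - (m + 1) from by omega]
      rfl

-- the toList of A's string-accumulating loop
theorem strfold_toList (g : Nat → String) : ∀ (l : List Nat) (s : String),
    (l.foldl (fun v i => v ++ g i) s).toList
      = s.toList ++ (l.map (fun i => (g i).toList)).flatten := by
  intro l
  induction l with
  | nil => simp
  | cons k l ih =>
      intro s
      simp only [List.foldl_cons, ih, String.toList_append, List.map_cons, List.flatten_cons,
        List.append_assoc]

theorem flatten_intersperse_nil : ∀ css : List (List Char),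
    (List.intersperse ([] : List Char) css).flatten = css.flatten
  | [] => rfl
  | [c] => rfl
  | c1 :: c2 :: cs => by simp [flatten_intersperse_nil (c2 :: cs)]

-- ===== VERDICT (by name: the statement is the Claim_ definition above) =====
theorem anf_to_vector_spec : Claim_equal_anf_to_vector := by
  intro anf _ hpre
  have hn : 1 ≤ anf.length := List.length_pos_iff.mpr hpre
  unfold Spec_anf_to_vector anf_to_vector anf_to_vector_alt
  rw [matlem anf (anf.length - 1), show anf.length - 1 + 1 = anf.length from by omega]
  rw [List.foldl_map, PySem.List.foldl_append_singleton_eq_map, List.nil_append]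
  apply String.toList_inj.mp
  rw [strfold_toList, PySem.Str.toList_join, List.map_map]
  show [] ++ _ = PySem.Chars.join [] _
  rw [List.nil_append]
  unfold PySem.Chars.join
  rw [List.intercalate, flatten_intersperse_nil]
  congr 1
  apply List.map_congr_left
  intro i hi
  have hi' : i < anf.length := List.mem_range.mp hi
  simp only [Function.comp]
  rw [main_lemma anf i 0 (by omega)]
  rw [foldl_if_eq_xsum, zero_bxor]
  unfold Xv
  rw [xsum_congr (fun k _ => by rw [Nat.zero_add])]
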